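-- pv_equiv track=rewrite | github.com/Bumblebee-AGI/bumblebee | bumblebee/memory/knowledge.py | parse_knowledge_sections
-- ===== SOURCE A (Python) =====
-- def _is_h2_header(line: str) -> bool:
--     s = line.strip()
--     if not s.startswith("##"):
--         return False
--     return not s.startswith("###")
--
-- def parse_knowledge_sections(raw: str) -> list[tuple[str, str]]:
--     """Split markdown into (header_title, body) pairs; title is the line after ``## `` (H2 only)."""
--     sections: list[tuple[str, str]] = []
--     current_title: str | None = None
--     body_lines: list[str] = []
--     for line in raw.splitlines():
--         if _is_h2_header(line):
--             if current_title is not None: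
--                 sections.append((current_title, "\n".join(body_lines).strip()))
--             current_title = line.strip()[2:].strip()
--             body_lines = []
--         elif current_title is not None:
--             body_lines.append(line)
--     if current_title is not None:
--         sections.append((current_title, "\n".join(body_lines).strip()))
--     return sections
-- ===== SOURCE B (Python) =====
-- def _is_h2_header(line: str) -> bool:
--     s = line.strip()
--     if not s.startswith("##"):
--         return False
--     return not s.startswith("###")
--
-- def parse_knowledge_sections(raw: str) -> list[tuple[str, str]]:
--     """Single backward pass: walk the lines in reverse, collecting body lines
--     until a header is met; no optional current-title state, no trailing flush,
--     and lines before the first header are discarded automatically."""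
--     sections: list[tuple[str, str]] = []
--     body: list[str] = []
--     for line in reversed(raw.splitlines()):
--         if _is_h2_header(line):
--             sections.append((line.strip()[2:].strip(), "\n".join(reversed(body)).strip()))
--             body = []
--         else:
--             body.append(line)
--     sections.reverse()
--     return sections
-- ===== Notes on version B (the rewrite author's own statement) =====
-- stated objective: alternative
-- what changed: Replaces the forward scan with optional current-title state and a trailing flush by a single backward pass that collects body lines until a header is met, discarding pre-header lines implicitly.
import Mathlib
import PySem

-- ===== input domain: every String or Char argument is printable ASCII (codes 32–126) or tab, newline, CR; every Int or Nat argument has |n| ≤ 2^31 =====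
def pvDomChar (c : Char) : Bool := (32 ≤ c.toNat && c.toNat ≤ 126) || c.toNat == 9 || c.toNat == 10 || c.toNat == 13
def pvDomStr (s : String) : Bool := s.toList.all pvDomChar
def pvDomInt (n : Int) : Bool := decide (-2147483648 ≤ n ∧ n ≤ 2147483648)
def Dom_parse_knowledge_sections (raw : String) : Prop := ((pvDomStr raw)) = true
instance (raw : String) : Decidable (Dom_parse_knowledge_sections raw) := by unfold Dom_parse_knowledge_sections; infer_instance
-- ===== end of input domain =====

-- B walks the lines in a single backward pass (reverse traversal, no optional
-- current-title state, no trailing flush); objective: alternative decomposition.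

-- ===== PORT A =====
-- _is_h2_header (module helper, shared verbatim by both Pythons)
def pvIsH2 (line : String) : Bool :=
  let s := PySem.Str.strip line
  if !(PySem.Str.startswith s "##") then false
  else !(PySem.Str.startswith s "###")

-- line.strip()[2:].strip()
def pvTitle (line : String) : String :=
  PySem.Str.strip (PySem.Str.slice (PySem.Str.strip line) (some 2) none)

-- "\n".join(bs).strip()
def pvFinish (bs : List String) : String :=
  PySem.Str.strip (PySem.Str.join "\n" bs)

-- loop body of A: state = (sections, current_title, body_lines)
def pvStepA (st : List (String × String) × Option String × List String) (line : String) :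
    List (String × String) × Option String × List String :=
  if pvIsH2 line then
    match st.2.1 with
    | some t => (st.1 ++ [(t, pvFinish st.2.2)], some (pvTitle line), [])
    | none => (st.1, some (pvTitle line), [])
  else
    match st.2.1 with
    | some _ => (st.1, st.2.1, st.2.2 ++ [line])
    | none => st

def parse_knowledge_sections (raw : String) : List (String × String) :=
  let st := (PySem.Str.splitlines raw).foldl pvStepA ([], none, [])
  match st.2.1 with
  | some t => st.1 ++ [(t, pvFinish st.2.2)]
  | none => st.1

-- ===== PORT B =====
-- loop body of B: state = (sections, body); body holds the pending lines in
-- reverse order (the loop runs over reversed(lines)), hence the join of body.reverse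
def pvStepB (st : List (String × String) × List String) (line : String) :
    List (String × String) × List String :=
  if pvIsH2 line then (st.1 ++ [(pvTitle line, pvFinish st.2.reverse)], [])
  else (st.1, st.2 ++ [line])

def parse_knowledge_sections_alt (raw : String) : List (String × String) :=
  let st := (PySem.Str.splitlines raw).reverse.foldl pvStepB ([], [])
  st.1.reverse

-- ===== PRECONDITION & SPEC =====
def Spec_parse_knowledge_sections (raw : String) (out : List (String × String)) : Prop := out = parse_knowledge_sections_alt raw
instance (raw : String) (out : List (String × String)) : Decidable (Spec_parse_knowledge_sections raw out) := by unfold Spec_parse_knowledge_sections; infer_instance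

-- ===== CLAIM (what is proved, stated in full; the proofs are below) =====
def Claim_equal_parse_knowledge_sections : Prop := ∀ (raw : String), Dom_parse_knowledge_sections raw → Spec_parse_knowledge_sections raw (parse_knowledge_sections raw)

-- ===== LEMMAS AND PROOFS =====

-- reference recursion: sections of ls given a current title t and accumulated body b
def pvF : List String → String → List String → List (String × String)
  | [], t, b => [(t, pvFinish b)]
  | l :: ls, t, b =>
    if pvIsH2 l then (t, pvFinish b) :: pvF ls (pvTitle l) []
    else pvF ls t (b ++ [l])

-- reference recursion: sections of ls with no current title yet
def pvG : List String → List (String × String)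
  | [] => []
  | l :: ls => if pvIsH2 l then pvF ls (pvTitle l) [] else pvG ls

def pvPostA (st : List (String × String) × Option String × List String) : List (String × String) :=
  match st.2.1 with
  | some t => st.1 ++ [(t, pvFinish st.2.2)]
  | none => st.1

theorem pvA_some (ls : List String) (s : List (String × String)) (t : String) (b : List String) :
    pvPostA (ls.foldl pvStepA (s, some t, b)) = s ++ pvF ls t b := by
  induction ls generalizing s t b with
  | nil => simp [pvPostA, pvF]
  | cons l ls ih =>
    by_cases h : pvIsH2 l <;> simp [pvStepA, h, pvF, ih]

theorem pvA_none (ls : List String) (s : List (String × String)) (b : List String) :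
    pvPostA (ls.foldl pvStepA (s, none, b)) = s ++ pvG ls := by
  induction ls generalizing s b with
  | nil => simp [pvPostA, pvG]
  | cons l ls ih =>
    by_cases h : pvIsH2 l <;> simp [pvStepA, h, pvG, ih, pvA_some]

theorem pvF_char (ls : List String) (t : String) (b : List String) :
    pvF ls t b = (t, pvFinish (b ++ ls.takeWhile (fun l => !pvIsH2 l))) :: pvG ls := by
  induction ls generalizing t b with
  | nil => simp [pvF, pvG]
  | cons l ls ih =>
    by_cases h : pvIsH2 l <;> simp [pvF, pvG, h, ih]

theorem pvB_char (ls : List String) :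
    ls.foldr (fun x st => pvStepB st x) ([], []) =
      ((pvG ls).reverse, (ls.takeWhile (fun l => !pvIsH2 l)).reverse) := by
  induction ls with
  | nil => simp [pvG]
  | cons l ls ih =>
    simp only [List.foldr_cons]
    rw [ih]
    by_cases h : pvIsH2 l <;> simp [pvStepB, h, pvG, pvF_char]

-- ===== VERDICT (by name: the statement is the Claim_ definition above) =====
theorem parse_knowledge_sections_spec : Claim_equal_parse_knowledge_sections := by
  intro raw _
  unfold Spec_parse_knowledge_sections parse_knowledge_sections parse_knowledge_sections_alt
  rw [List.foldl_reverse, pvB_char]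
  have := pvA_none (PySem.Str.splitlines raw) [] []
  simp [pvPostA] at this
  simp [this]
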